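-- pv_equiv track=rewrite | github.com/paratpanu18/Object-Oriented-Data-Structure | Excercise/ch_10/5.py | find_min_max_weight
-- ===== SOURCE A (Python) =====
-- def can_divide(weights, k, max_weight):
--     current_sum = 0
--     boxes_used = 1
--
--     for weight in weights:
--         if current_sum + weight > max_weight:
--             boxes_used += 1
--             current_sum = weight
--             if boxes_used > k:
--                 return False
--         else:
--             current_sum += weight
--
--     return True
--
-- def find_min_max_weight(weights, k):
--     left, right = max(weights), sum(weights)
--     answer = right
--
--     while left <= right:
--         mid = (left + right) // 2
--         if can_divide(weights, k, mid):
--             answer = mid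
--             right = mid - 1
--         else:
--             left = mid + 1
--
--     return answer
-- ===== SOURCE B (Python) =====
-- def find_min_max_weight(weights, k):
--     # Interval DP on prefix sums: row[i] = min over splits of max group sum
--     # for the first i weights using the current number of groups; one more
--     # group is added per round, up to min(k, len(weights)) groups.
--     n = len(weights)
--     pref = [0]
--     s = 0
--     for w in weights:
--         s += w
--         pref.append(s)
--     row = pref[:]                       # one group: row[i] = pref[i]
--     for _ in range(1, min(k, n)):       # rounds 2 .. min(k, n)
--         row = [min(max(row[m], pref[i] - pref[m]) for m in range(i + 1))
--                for i in range(n + 1)]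
--     return row[n]
-- ===== Notes on version B (the rewrite author's own statement) =====
-- stated objective: alternative
-- what changed: Replaces A's binary search over candidate capacities (each probed with a greedy feasibility scan) by an interval dynamic program over prefix sums: row[i] = min over split points m of max(row[m], pref[i]-pref[m]), iterated up to min(k, n) groups, returning row[n].
-- outside the precondition, e.g. on find_min_max_weight([-5, 3], 2): A returns -2, B returns 0; on find_min_max_weight([], 1): A raises ValueError, B returns 0
import Mathlib
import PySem

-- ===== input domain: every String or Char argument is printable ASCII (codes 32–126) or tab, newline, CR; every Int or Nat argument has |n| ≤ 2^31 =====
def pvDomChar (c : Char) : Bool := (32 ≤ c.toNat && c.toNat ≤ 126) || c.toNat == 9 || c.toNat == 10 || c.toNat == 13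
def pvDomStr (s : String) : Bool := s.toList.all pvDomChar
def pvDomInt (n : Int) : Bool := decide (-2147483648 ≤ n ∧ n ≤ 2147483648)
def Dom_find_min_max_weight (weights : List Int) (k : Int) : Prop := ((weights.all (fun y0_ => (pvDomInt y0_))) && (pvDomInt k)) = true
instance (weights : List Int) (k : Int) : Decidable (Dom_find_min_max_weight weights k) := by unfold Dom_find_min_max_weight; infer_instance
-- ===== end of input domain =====

-- B replaces A's binary search over candidate maxima by an interval DP over
-- prefix sums (objective: alternative algorithm, not faster).

-- ===== PORT A =====
-- can_divide's loop, with its early 'return False' (cur = current_sum, b = boxes_used)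
def canDivideGo (k max_weight : Int) : List Int → Int → Int → Bool
  | [], _, _ => true
  | w :: ws, cur, b =>
    if cur + w > max_weight then
      if b + 1 > k then false
      else canDivideGo k max_weight ws w (b + 1)
    else canDivideGo k max_weight ws (cur + w) b

def can_divide (weights : List Int) (k max_weight : Int) : Bool :=
  canDivideGo k max_weight weights 0 1

-- the 'while left <= right' binary-search loop of A
def bsearchA (weights : List Int) (k : Int) (left right answer : Int) : Int :=
  if h : left ≤ right then
    let mid := PySem.Int.floordiv (left + right) 2
    if can_divide weights k mid then bsearchA weights k left (mid - 1) mid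
    else bsearchA weights k (mid + 1) right answer
  else answer
termination_by (right + 1 - left).toNat
decreasing_by
  · have := PySem.Int.floordiv_two_mid_bounds h
    omega
  · have := PySem.Int.floordiv_two_mid_bounds h
    omega

def find_min_max_weight (weights : List Int) (k : Int) : Int :=
  let left := (PySem.List.max? weights (fun x => x)).getD 0   -- max(weights); [] raises → outside Pre_
  let right := weights.sum                                     -- sum(weights)
  bsearchA weights k left right right

-- ===== PORT B =====
def find_min_max_weight_alt (weights : List Int) (k : Int) : Int :=
  let n : Int := weights.length
  -- pref = [0]; s = 0; for w in weights: s += w; pref.append(s)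
  let pref := (weights.foldl (fun (p : List Int × Int) w => (p.1 ++ [p.2 + w], p.2 + w)) ([0], 0)).1
  let row := pref                                              -- row = pref[:]
  -- for _ in range(1, min(k, n)): row = [min(max(row[m], pref[i]-pref[m]) for m in range(i+1)) for i in range(n+1)]
  let row := (PySem.List.pyRange 1 (min k n)).foldl
      (fun row _ => (PySem.List.pyRange 0 (n + 1)).map (fun i =>
        (PySem.List.min? ((PySem.List.pyRange 0 (i + 1)).map
            (fun m => max (PySem.List.pyGetD row m 0)
                          (PySem.List.pyGetD pref i 0 - PySem.List.pyGetD pref m 0)))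
          (fun x => x)).getD 0)) row
  PySem.List.pyGetD row n 0                                    -- row[n]

-- ===== PRECONDITION & SPEC =====
-- Pre_ excludes the empty list, on which A raises (max of []), and the inputs
-- with a negative weight combined with k ≥ 2, where A's binary-search bracket
-- [max(weights), sum(weights)] and its greedy probe are meaningless (the probe
-- is not even monotone in the cap), so A's value there is an accident of the search path.
def Pre_find_min_max_weight (weights : List Int) (k : Int) : Prop :=
  weights ≠ [] ∧ ((∀ w ∈ weights, 0 ≤ w) ∨ k ≤ 1)
instance (weights : List Int) (k : Int) : Decidable (Pre_find_min_max_weight weights k) := by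
  unfold Pre_find_min_max_weight; infer_instance

def pvWitness_find_min_max_weight : List Int × Int := ([7, 2, 5, 10, 8], 2)

def Spec_find_min_max_weight (weights : List Int) (k : Int) (out : Int) : Prop := out = find_min_max_weight_alt weights k
instance (weights : List Int) (k : Int) (out : Int) : Decidable (Spec_find_min_max_weight weights k out) := by unfold Spec_find_min_max_weight; infer_instance

-- ===== CLAIM (what is proved, stated in full; the proofs are below) =====
def Claim_equal_find_min_max_weight : Prop := ∀ (weights : List Int) (k : Int), Dom_find_min_max_weight weights k → Pre_find_min_max_weight weights k → Spec_find_min_max_weight weights k (find_min_max_weight weights k)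


-- ===== LEMMAS AND PROOFS =====

-- ---- common spec material: greedy state machine and the DP recurrence ----

-- sum of the first i weights (prefix sum)
def S (ws : List Int) (i : Nat) : Int := (ws.take i).sum

-- the greedy state machine of can_divide, without the early exit
def gbAux (c : Int) : List Int → Int → Int → Int × Int
  | [], cur, b => (b, cur)
  | w :: ws, cur, b =>
    if cur + w > c then gbAux c ws w (b + 1) else gbAux c ws (cur + w) b

def boxesOf (ws : List Int) (c : Int) : Int := (gbAux c ws 0 1).1

-- min of h 0, …, h M
def minF (h : Nat → Int) : Nat → Int
  | 0 => h 0
  | m + 1 => min (minF h m) (h (m + 1))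

-- the DP rows: R ws t i = best max-group-sum for the first i weights with t+1 groups
def R (ws : List Int) : Nat → Nat → Int
  | 0, i => S ws i
  | t + 1, i => minF (fun m => max (R ws t m) (S ws i - S ws m)) i

theorem gbAux_fst_ge (c : Int) (ws : List Int) (cur b : Int) : b ≤ (gbAux c ws cur b).1 := by
  induction ws generalizing cur b with
  | nil => simp [gbAux]
  | cons w ws ih =>
    simp only [gbAux]
    split
    · exact le_trans (by omega) (ih w (b + 1))
    · exact ih (cur + w) b

theorem canDivideGo_eq (k c : Int) (ws : List Int) (cur b : Int) :
    canDivideGo k c ws cur b = decide ((gbAux c ws cur b).1 ≤ max k b) := by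
  induction ws generalizing cur b with
  | nil => simp [canDivideGo, gbAux]
  | cons w ws ih =>
    simp only [canDivideGo, gbAux]
    split
    · split
      · have h1 := gbAux_fst_ge c ws w (b + 1)
        have : ¬ ((gbAux c ws w (b + 1)).1 ≤ max k b) := by omega
        simp [this]
      · rw [ih w (b + 1)]
        congr 1
        have : max k (b + 1) = max k b := by omega
        rw [this]
    · exact ih (cur + w) b

theorem can_divide_eq (ws : List Int) (k c : Int) :
    can_divide ws k c = decide (boxesOf ws c ≤ max k 1) := by
  have := canDivideGo_eq k c ws 0 1
  simpa [can_divide, boxesOf] using this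

theorem gbAux_append (c : Int) (xs ys : List Int) (cur b : Int) :
    gbAux c (xs ++ ys) cur b = gbAux c ys (gbAux c xs cur b).2 (gbAux c xs cur b).1 := by
  induction xs generalizing cur b with
  | nil => simp [gbAux]
  | cons w ws ih =>
    simp only [List.cons_append, gbAux]
    split
    · exact ih w (b + 1)
    · exact ih (cur + w) b

theorem gbAux_snd_nonneg (c : Int) (ws : List Int) (cur b : Int)
    (hnn : ∀ w ∈ ws, 0 ≤ w) (hc : 0 ≤ cur) : 0 ≤ (gbAux c ws cur b).2 := by
  induction ws generalizing cur b with
  | nil => simpa [gbAux]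
  | cons w ws ih =>
    have hw : 0 ≤ w := hnn w (by simp)
    have hnn' : ∀ x ∈ ws, 0 ≤ x := fun x hx => hnn x (by simp [hx])
    simp only [gbAux]
    split
    · exact ih w (b + 1) hnn' hw
    · exact ih (cur + w) b hnn' (by omega)

theorem gbAux_no_overflow (c : Int) (ws : List Int) (cur b : Int)
    (hnn : ∀ w ∈ ws, 0 ≤ w) (hc : 0 ≤ cur) (hs : cur + ws.sum ≤ c) :
    gbAux c ws cur b = (b, cur + ws.sum) := by
  induction ws generalizing cur b with
  | nil => simp [gbAux]
  | cons w ws ih =>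
    have hw : 0 ≤ w := hnn w (by simp)
    have hnn' : ∀ x ∈ ws, 0 ≤ x := fun x hx => hnn x (by simp [hx])
    have hsum : 0 ≤ ws.sum := List.sum_nonneg hnn'
    simp only [List.sum_cons] at hs
    simp only [gbAux]
    split
    · omega
    · rw [ih (cur + w) b hnn' (by omega) (by omega)]
      simp only [List.sum_cons]
      congr 1
      ring

theorem gbAux_one_overflow (c : Int) (ws : List Int) (cur b : Int)
    (hnn : ∀ w ∈ ws, 0 ≤ w) (hc : 0 ≤ cur) (hs : ws.sum ≤ c) :
    gbAux c ws cur b = (b, cur + ws.sum) ∨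
      ((gbAux c ws cur b).1 = b + 1 ∧ (gbAux c ws cur b).2 ≤ ws.sum) := by
  induction ws generalizing cur b with
  | nil => simp [gbAux]
  | cons w ws ih =>
    have hw : 0 ≤ w := hnn w (by simp)
    have hnn' : ∀ x ∈ ws, 0 ≤ x := fun x hx => hnn x (by simp [hx])
    have hsum : 0 ≤ ws.sum := List.sum_nonneg hnn'
    simp only [List.sum_cons] at hs ⊢
    simp only [gbAux]
    split
    · -- overflow at w: rest fits entirely (w + ws.sum ≤ c)
      right
      rw [gbAux_no_overflow c ws w (b + 1) hnn' hw (by omega)]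
      constructor
      · rfl
      · omega
    · rcases ih (cur + w) b hnn' (by omega) (by omega) with h | h
      · left; rw [h]; congr 1; ring
      · right
        exact ⟨h.1, by omega⟩

theorem gbAux_dominance (ws : List Int) (x y cur1 cur2 b1 b2 : Int)
    (hnn : ∀ w ∈ ws, 0 ≤ w) (hxy : x ≤ y) (hc1 : 0 ≤ cur1) (hc2 : 0 ≤ cur2)
    (hrel : b2 < b1 ∨ (b2 = b1 ∧ cur2 ≤ cur1)) :
    (gbAux y ws cur2 b2).1 < (gbAux x ws cur1 b1).1 ∨
      ((gbAux y ws cur2 b2).1 = (gbAux x ws cur1 b1).1 ∧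
        (gbAux y ws cur2 b2).2 ≤ (gbAux x ws cur1 b1).2) := by
  induction ws generalizing cur1 cur2 b1 b2 with
  | nil => simp only [gbAux]; omega
  | cons w ws ih =>
    have hw : 0 ≤ w := hnn w (by simp)
    have hnn' : ∀ a ∈ ws, 0 ≤ a := fun a ha => hnn a (by simp [ha])
    simp only [gbAux]
    by_cases h1 : cur1 + w > x <;> by_cases h2 : cur2 + w > y
    · rw [if_pos h1, if_pos h2]
      exact ih w w (b1 + 1) (b2 + 1) hnn' hw hw (by omega)
    · rw [if_pos h1, if_neg h2]
      exact ih w (cur2 + w) (b1 + 1) b2 hnn' hw (by omega) (by omega)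
    · rw [if_neg h1, if_pos h2]
      exact ih (cur1 + w) w b1 (b2 + 1) hnn' (by omega) hw (by omega)
    · rw [if_neg h1, if_neg h2]
      exact ih (cur1 + w) (cur2 + w) b1 b2 hnn' (by omega) (by omega) (by omega)

theorem boxes_mono (ws : List Int) (x y : Int) (hnn : ∀ w ∈ ws, 0 ≤ w) (hxy : x ≤ y) :
    boxesOf ws y ≤ boxesOf ws x := by
  have := gbAux_dominance ws x y 0 0 1 1 hnn hxy le_rfl le_rfl (Or.inr ⟨rfl, le_rfl⟩)
  unfold boxesOf
  omega

theorem boxes_sum (ws : List Int) (hnn : ∀ w ∈ ws, 0 ≤ w) : boxesOf ws ws.sum = 1 := by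
  unfold boxesOf
  rw [gbAux_no_overflow ws.sum ws 0 1 hnn le_rfl (by omega)]

theorem gbAux_fst_le_len (c : Int) (ws : List Int) (cur b : Int) :
    (gbAux c ws cur b).1 ≤ b + ws.length := by
  induction ws generalizing cur b with
  | nil => simp [gbAux]
  | cons w ws ih =>
    simp only [gbAux, List.length_cons]
    split
    · have := ih w (b + 1); push_cast; omega
    · have := ih (cur + w) b; push_cast; omega

theorem boxes_le_len (ws : List Int) (c : Int) (hne : ws ≠ []) (hle : ∀ w ∈ ws, w ≤ c) :
    boxesOf ws c ≤ ws.length := by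
  match ws, hne with
  | w :: ws, _ =>
    have hw : w ≤ c := hle w (by simp)
    unfold boxesOf
    simp only [gbAux, List.length_cons]
    rw [if_neg (by omega)]
    have := gbAux_fst_le_len c ws (0 + w) 1
    push_cast
    omega

-- ---- prefix sums ----

theorem S_zero (ws : List Int) : S ws 0 = 0 := rfl

theorem S_succ (ws : List Int) (i : Nat) (h : i < ws.length) :
    S ws (i + 1) = S ws i + ws[i] := by
  exact List.sum_take_succ ws i h

theorem S_nonneg (ws : List Int) (i : Nat) (hnn : ∀ w ∈ ws, 0 ≤ w) : 0 ≤ S ws i := by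
  exact List.sum_nonneg fun w hw => hnn w (List.mem_of_mem_take hw)

theorem seg_sum (ws : List Int) (i j : Nat) (hij : i ≤ j) :
    S ws j - S ws i = (((ws.drop i).take (j - i)).sum) := by
  have h : ws.take j = ws.take i ++ (ws.drop i).take (j - i) := by
    rw [← List.take_add]
    congr 1
    omega
  unfold S
  rw [h, List.sum_append]
  ring

-- ---- minF ----

theorem minF_le (h : Nat → Int) (m M : Nat) (hm : m ≤ M) : minF h M ≤ h m := by
  induction M with
  | zero =>
    have : m = 0 := by omega
    subst this; exact le_rfl
  | succ M ih =>
    rcases Nat.lt_or_ge m (M + 1) with hlt | hge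
    · exact le_trans (min_le_left _ _) (ih (by omega))
    · have : m = M + 1 := by omega
      subst this
      exact min_le_right _ _

theorem minF_attained (h : Nat → Int) (M : Nat) : ∃ m ≤ M, minF h M = h m := by
  induction M with
  | zero => exact ⟨0, le_rfl, rfl⟩
  | succ M ih =>
    obtain ⟨m, hm, he⟩ := ih
    rcases le_total (minF h M) (h (M + 1)) with hle | hle
    · exact ⟨m, by omega, by simp only [minF]; rw [min_eq_left hle]; exact he⟩
    · exact ⟨M + 1, le_rfl, by simp only [minF]; rw [min_eq_right hle]⟩

theorem minF_congr (f g : Nat → Int) (M : Nat) (h : ∀ m ≤ M, f m = g m) :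
    minF f M = minF g M := by
  induction M with
  | zero => exact h 0 le_rfl
  | succ M ih =>
    simp only [minF]
    rw [ih (fun m hm => h m (by omega)), h (M + 1) le_rfl]

-- ---- DP rows ----

theorem R_nonneg (ws : List Int) (t i : Nat) (hnn : ∀ w ∈ ws, 0 ≤ w) : 0 ≤ R ws t i := by
  induction t generalizing i with
  | zero => exact S_nonneg ws i hnn
  | succ t ih =>
    obtain ⟨m, hm, he⟩ := minF_attained (fun m => max (R ws t m) (S ws i - S ws m)) i
    simp only [R]
    rw [he]
    exact le_trans (ih m) (le_max_left _ _)

theorem R_succ_le (ws : List Int) (t i : Nat) (hnn : ∀ w ∈ ws, 0 ≤ w) :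
    R ws (t + 1) i ≤ R ws t i := by
  have h := minF_le (fun m => max (R ws t m) (S ws i - S ws m)) i i le_rfl
  have h0 := R_nonneg ws t i hnn
  simp only [R]
  simp only [sub_self] at h
  omega

theorem R_mono_t (ws : List Int) (t t' i : Nat) (hnn : ∀ w ∈ ws, 0 ≤ w) (h : t ≤ t') :
    R ws t' i ≤ R ws t i := by
  induction t', h using Nat.le_induction with
  | base => exact le_rfl
  | succ t' ht ih => exact le_trans (R_succ_le ws t' i hnn) ih

theorem R_ge_mem (ws : List Int) (t i : Nat) (hnn : ∀ w ∈ ws, 0 ≤ w)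
    (w : Int) (hw : w ∈ ws.take i) : w ≤ R ws t i := by
  induction t generalizing i with
  | zero =>
    exact List.single_le_sum (fun x hx => hnn x (List.mem_of_mem_take hx)) w hw
  | succ t ih =>
    obtain ⟨m, hm, he⟩ := minF_attained (fun m => max (R ws t m) (S ws i - S ws m)) i
    simp only [R]
    rw [he]
    have hsplit : ws.take i = ws.take m ++ (ws.drop m).take (i - m) := by
      rw [← List.take_add]; congr 1; omega
    rw [hsplit] at hw
    rcases List.mem_append.mp hw with hmem | hmem
    · exact le_trans (ih m hmem) (le_max_left _ _)
    · have : w ≤ (((ws.drop m).take (i - m)).sum) :=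
        List.single_le_sum (fun x hx => hnn x (List.mem_of_mem_drop (List.mem_of_mem_take hx))) w hmem
      rw [← seg_sum ws m i hm] at this
      exact le_trans this (le_max_right _ _)

-- greedy dominance: a cap achievable with t+1 groups needs at most t+1 greedy boxes
theorem gb_le_of_R_le (ws : List Int) (t i : Nat) (c : Int)
    (hnn : ∀ w ∈ ws, 0 ≤ w) (hi : i ≤ ws.length) (hR : R ws t i ≤ c) :
    (gbAux c (ws.take i) 0 1).1 ≤ (t : Int) + 1 := by
  induction t generalizing i with
  | zero =>
    have h0 : (0 : Int) + (ws.take i).sum ≤ c := by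
      have : (ws.take i).sum = S ws i := rfl
      simp only [R, zero_add] at hR ⊢
      omega
    rw [gbAux_no_overflow c (ws.take i) 0 1 (fun w hw => hnn w (List.mem_of_mem_take hw)) le_rfl h0]
    norm_num
  | succ t ih =>
    simp only [R] at hR
    obtain ⟨m, hm, he⟩ := minF_attained (fun m => max (R ws t m) (S ws i - S ws m)) i
    rw [he] at hR
    have hRm : R ws t m ≤ c := le_trans (le_max_left _ _) hR
    have hseg : S ws i - S ws m ≤ c := le_trans (le_max_right _ _) hR
    have h1 := ih m (by omega) hRm
    have hsplit : ws.take i = ws.take m ++ (ws.drop m).take (i - m) := by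
      rw [← List.take_add]; congr 1; omega
    rw [hsplit, gbAux_append]
    set p := gbAux c (ws.take m) 0 1 with hp
    have hp2 : 0 ≤ p.2 := gbAux_snd_nonneg c (ws.take m) 0 1 (fun w hw => hnn w (List.mem_of_mem_take hw)) le_rfl
    have hsegnn : ∀ w ∈ (ws.drop m).take (i - m), 0 ≤ w :=
      fun w hw => hnn w (List.mem_of_mem_drop (List.mem_of_mem_take hw))
    have hsegsum : (((ws.drop m).take (i - m)).sum) ≤ c := by
      rw [← seg_sum ws m i hm]; exact hseg
    rcases gbAux_one_overflow c ((ws.drop m).take (i - m)) p.2 p.1 hsegnn hp2 hsegsum with h | h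
    · rw [h]; push_cast; omega
    · push_cast; omega

theorem feas_of_R (ws : List Int) (t : Nat) (c : Int)
    (hnn : ∀ w ∈ ws, 0 ≤ w) (hR : R ws t ws.length ≤ c) :
    boxesOf ws c ≤ (t : Int) + 1 := by
  have := gb_le_of_R_le ws t ws.length c hnn le_rfl hR
  rw [List.take_length] at this
  exact this

-- the converse: a greedy run with b boxes yields a DP bound with b groups
theorem R_le_of_gb (ws : List Int) (c : Int)
    (hnn : ∀ w ∈ ws, 0 ≤ w) (hle : ∀ w ∈ ws, w ≤ c) (hc : 0 ≤ c) :
    ∀ i ≤ ws.length, ∃ m ≤ i,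
      (gbAux c (ws.take i) 0 1).2 = S ws i - S ws m ∧ S ws i - S ws m ≤ c ∧
      (((gbAux c (ws.take i) 0 1).1 = 1 ∧ m = 0) ∨
        (2 ≤ (gbAux c (ws.take i) 0 1).1 ∧
          R ws ((gbAux c (ws.take i) 0 1).1.toNat - 2) m ≤ c)) := by
  intro i
  induction i with
  | zero =>
    intro _
    refine ⟨0, le_rfl, ?_, ?_, Or.inl ⟨rfl, rfl⟩⟩ <;> simp [gbAux, S]
    exact hc
  | succ i ih =>
    intro hi1
    have hi : i < ws.length := by omega
    obtain ⟨m, hm, hcur, hsegc, hOr⟩ := ih (by omega)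
    have hw0 : 0 ≤ ws[i] := hnn _ (List.getElem_mem hi)
    have hwc : ws[i] ≤ c := hle _ (List.getElem_mem hi)
    have hsplit : ws.take (i + 1) = ws.take i ++ [ws[i]] := by
      rw [List.take_add_one]
      simp [List.getElem?_eq_getElem hi]
    have hS : S ws (i + 1) = S ws i + ws[i] := S_succ ws i hi
    rw [hsplit, gbAux_append]
    set p := gbAux c (ws.take i) 0 1 with hp
    have hb1 : 1 ≤ p.1 := gbAux_fst_ge c (ws.take i) 0 1
    by_cases hov : p.2 + ws[i] > c
    · -- overflow: a new box holding just ws[i]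
      have hstep : gbAux c [ws[i]] p.2 p.1 = (p.1 + 1, ws[i]) := by
        simp only [gbAux]
        rw [if_pos hov]
      rw [hstep]
      refine ⟨i, by omega, by simp; omega, by omega, Or.inr ⟨by simp; omega, ?_⟩⟩
      -- R ((p.1+1).toNat - 2) i ≤ c
      rcases hOr with ⟨hb, hm0⟩ | ⟨hb2, hR⟩
      · -- p.1 = 1, m = 0: one box so far, cur = S i ≤ c; (1+1).toNat-2 = 0
        have : ((p.1 + 1).toNat - 2) = 0 := by omega
        rw [this]
        subst hm0
        simp only [R]
        simp only [S_zero, sub_zero] at hcur hsegc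
        omega
      · have h1 : ((p.1 + 1).toNat - 2) = (p.1.toNat - 2) + 1 := by omega
        rw [h1]
        simp only [R]
        have h2 := minF_le (fun m' => max (R ws (p.1.toNat - 2) m') (S ws i - S ws m')) m i hm
        simp only at h2
        have h3 : max (R ws (p.1.toNat - 2) m) (S ws i - S ws m) ≤ c := by
          apply max_le hR
          omega
        exact le_trans h2 h3
    · -- no overflow: ws[i] joins the current box
      have hstep : gbAux c [ws[i]] p.2 p.1 = (p.1, p.2 + ws[i]) := by
        simp only [gbAux]
        rw [if_neg hov]
      rw [hstep]
      exact ⟨m, by omega, by simp; omega, by omega, by simpa using hOr⟩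

theorem R_le_of_boxes (ws : List Int) (c : Int) (t : Nat)
    (hnn : ∀ w ∈ ws, 0 ≤ w) (hle : ∀ w ∈ ws, w ≤ c) (hc : 0 ≤ c)
    (hb : boxesOf ws c ≤ (t : Int) + 1) :
    R ws t ws.length ≤ c := by
  obtain ⟨m, hm, hcur, hsegc, hOr⟩ := R_le_of_gb ws c hnn hle hc ws.length le_rfl
  rw [List.take_length] at hcur hOr
  have hkey : R ws ((boxesOf ws c).toNat - 1) ws.length ≤ c := by
    rcases hOr with ⟨hb, hm0⟩ | ⟨hb2, hR⟩
    · have : ((boxesOf ws c).toNat - 1) = 0 := by unfold boxesOf; omega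
      rw [this]
      subst hm0
      simp only [R]
      simp only [S_zero, sub_zero] at hsegc
      exact hsegc
    · have h1 : ((boxesOf ws c).toNat - 1) = ((boxesOf ws c).toNat - 2) + 1 := by
        unfold boxesOf; omega
      rw [h1]
      simp only [R]
      have h2 := minF_le (fun m' => max (R ws ((boxesOf ws c).toNat - 2) m') (S ws ws.length - S ws m')) m ws.length hm
      simp only at h2
      refine le_trans h2 (max_le ?_ (by omega))
      unfold boxesOf
      exact hR
  have hb1 : 1 ≤ boxesOf ws c := gbAux_fst_ge c ws 0 1
  have : ((boxesOf ws c).toNat - 1) ≤ t := by omega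
  exact le_trans (R_mono_t ws ((boxesOf ws c).toNat - 1) t ws.length hnn this) hkey


-- ---- binary search ----

theorem bsearchA_spec (ws : List Int) (k L0 R0 : Int) (hnn : ∀ w ∈ ws, 0 ≤ w)
    (hL0R0 : L0 ≤ R0) (hFR0 : boxesOf ws R0 ≤ max k 1) :
    ∀ n (left right answer : Int), (right + 1 - left).toNat = n →
      L0 ≤ left → right ≤ R0 → left ≤ right + 1 →
      (∀ m, L0 ≤ m → m < left → ¬ (boxesOf ws m ≤ max k 1)) →
      (right < R0 → answer = right + 1 ∧ boxesOf ws answer ≤ max k 1) →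
      (right = R0 → answer = R0) →
      boxesOf ws (bsearchA ws k left right answer) ≤ max k 1 ∧
        L0 ≤ bsearchA ws k left right answer ∧
        ∀ m, L0 ≤ m → m < bsearchA ws k left right answer → ¬ (boxesOf ws m ≤ max k 1) := by
  intro n
  induction n using Nat.strong_induction_on with
  | _ n ihn =>
    intro left right answer hn hL hR hlr1 hlow hans hansR0
    rw [bsearchA]
    split
    · rename_i hlr
      obtain ⟨hm1, hm2⟩ := PySem.Int.floordiv_two_mid_bounds hlr
      simp only [can_divide_eq, decide_eq_true_eq]
      by_cases hfeas : boxesOf ws (PySem.Int.floordiv (left + right) 2) ≤ max k 1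
      · rw [if_pos hfeas]
        exact ihn _ (by omega) left (PySem.Int.floordiv (left + right) 2 - 1) _ rfl hL
          (by omega) (by omega) hlow (fun _ => ⟨by omega, hfeas⟩)
          (fun h => absurd h (by omega))
      · rw [if_neg hfeas]
        refine ihn _ (by omega) (PySem.Int.floordiv (left + right) 2 + 1) right answer rfl
          (by omega) hR (by omega) ?_ hans hansR0
        intro m hmL hmlt hFm
        rcases lt_or_ge m left with h | h
        · exact hlow m hmL h hFm
        · exact hfeas (le_trans (boxes_mono ws m (PySem.Int.floordiv (left + right) 2) hnn (by omega)) hFm)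
    · rename_i hlr
      push Not at hlr
      rcases eq_or_lt_of_le hR with hEq | hLt
      · rw [hansR0 hEq]
        exact ⟨hFR0, by omega, fun m hm hml => hlow m hm (by omega)⟩
      · obtain ⟨ha1, ha2⟩ := hans hLt
        exact ⟨ha2, by omega, fun m hm hml => hlow m hm (by omega)⟩

-- ---- B's port computes the DP rows ----

theorem pref_eq (ws : List Int) :
    ws.foldl (fun (p : List Int × Int) w => (p.1 ++ [p.2 + w], p.2 + w)) ([0], 0) =
      ((List.range (ws.length + 1)).map (fun i => S ws i), ws.sum) := by
  induction ws using List.reverseRecOn with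
  | nil => simp [S]
  | append_singleton ws w ih =>
    rw [List.foldl_append, ih]
    simp only [List.foldl_cons, List.foldl_nil, List.length_append, List.length_singleton,
      Prod.mk.injEq]
    constructor
    · have h1 : (List.range (ws.length + 1)).map (fun i => S ws i) =
          (List.range (ws.length + 1)).map (fun i => S (ws ++ [w]) i) := by
        apply List.map_congr_left
        intro i hi
        rw [List.mem_range] at hi
        unfold S
        rw [List.take_append_of_le_length (by omega)]
      rw [h1]
      conv_rhs => rw [List.range_succ, List.map_append]
      congr 1
      simp only [List.map_cons, List.map_nil]
      unfold S
      rw [List.take_of_length_le (by simp)]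
      simp
    · simp

theorem minq_bridge (f : Int → Int) (M : Nat) :
    (PySem.List.min? ((PySem.List.pyRange 0 ((M : Int) + 1)).map f) (fun x => x)).getD 0 =
      minF (fun m => f (m : Int)) M := by
  induction M with
  | zero =>
    have h0 : ((0 : Nat) : Int) + 1 = 0 + 1 := by norm_num
    rw [h0, PySem.List.pyRange_one_singleton]
    simp only [List.map_cons, List.map_nil]
    rw [PySem.List.min?_id_cons]
    simp [minF]
  | succ M ih =>
    have h0 : ((M + 1 : Nat) : Int) + 1 = ((M : Int) + 1) + 1 := by push_cast; ring
    rw [h0, PySem.List.pyRange_one_succ_right (by positivity)]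
    have hcons : PySem.List.pyRange 0 ((M : Int) + 1) = 0 :: PySem.List.pyRange 1 ((M : Int) + 1) := by
      rw [PySem.List.pyRange_one_cons (by positivity)]
      norm_num
    rw [hcons] at ih ⊢
    simp only [List.map_append, List.map_cons, List.map_nil, List.cons_append] at ih ⊢
    rw [PySem.List.min?_id_cons] at ih ⊢
    simp only [Option.getD_some] at ih ⊢
    rw [List.foldl_append]
    simp only [List.foldl_cons, List.foldl_nil, minF]
    rw [ih]
    congr 1

theorem rowStep_eq (ws : List Int) (t : Nat) :
    ((PySem.List.pyRange 0 ((ws.length : Int) + 1)).map (fun i =>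
        (PySem.List.min? ((PySem.List.pyRange 0 (i + 1)).map
            (fun m => max (PySem.List.pyGetD ((List.range (ws.length + 1)).map (fun j => R ws t j)) m 0)
                          (PySem.List.pyGetD ((List.range (ws.length + 1)).map (fun j => R ws 0 j)) i 0 -
                           PySem.List.pyGetD ((List.range (ws.length + 1)).map (fun j => R ws 0 j)) m 0)))
          (fun x => x)).getD 0)) =
      (List.range (ws.length + 1)).map (fun j => R ws (t + 1) j) := by
  have hn : ((ws.length : Int) + 1) = ((ws.length + 1 : Nat) : Int) := by push_cast; ring
  rw [hn, PySem.List.pyRange_zero_natCast, List.map_map]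
  apply List.map_congr_left
  intro i hi
  rw [List.mem_range] at hi
  simp only [Function.comp]
  rw [minq_bridge]
  simp only [R]
  apply minF_congr
  intro m hm
  rw [PySem.List.pyGetD_natCast, PySem.List.pyGetD_natCast, PySem.List.pyGetD_natCast,
    PySem.List.getD_map_range _ _ _ _ (by omega), PySem.List.getD_map_range _ _ _ _ (by omega),
    PySem.List.getD_map_range _ _ _ _ (by omega)]

theorem rows_foldl (ws : List Int) (l : List Int) (t : Nat) :
    l.foldl (fun (row : List Int) (_ : Int) => (PySem.List.pyRange 0 ((ws.length : Int) + 1)).map (fun i =>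
        (PySem.List.min? ((PySem.List.pyRange 0 (i + 1)).map
            (fun m => max (PySem.List.pyGetD row m 0)
                          (PySem.List.pyGetD ((List.range (ws.length + 1)).map (fun j => R ws 0 j)) i 0 -
                           PySem.List.pyGetD ((List.range (ws.length + 1)).map (fun j => R ws 0 j)) m 0)))
          (fun x => x)).getD 0)) ((List.range (ws.length + 1)).map (fun j => R ws t j)) =
      (List.range (ws.length + 1)).map (fun j => R ws (t + l.length) j) := by
  induction l generalizing t with
  | nil => simp
  | cons x l ih =>
    simp only [List.foldl_cons, List.length_cons]
    rw [rowStep_eq ws t, ih (t + 1), show t + 1 + l.length = t + (l.length + 1) from by omega]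

theorem alt_eq_R (ws : List Int) (k : Int) (hne : ws ≠ []) :
    find_min_max_weight_alt ws k = R ws (min k (ws.length : Int) - 1).toNat ws.length := by
  unfold find_min_max_weight_alt
  simp only [pref_eq]
  rw [show ((List.range (ws.length + 1)).map (fun i => S ws i)) =
      ((List.range (ws.length + 1)).map (fun j => R ws 0 j)) from rfl]
  rw [rows_foldl ws (PySem.List.pyRange 1 (min k (ws.length : Int))) 0]
  rw [PySem.List.pyGetD_natCast, PySem.List.getD_map_range _ _ _ _ (by omega)]
  congr 1
  rw [PySem.List.length_pyRange_one]
  omega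

theorem gbAux_one_imp_sum (c : Int) (ws : List Int) (cur b : Int)
    (h : (gbAux c ws cur b).1 = b) : ws = [] ∨ cur + ws.sum ≤ c := by
  induction ws generalizing cur b with
  | nil => left; rfl
  | cons w ws ih =>
    right
    simp only [gbAux] at h
    split at h
    · have := gbAux_fst_ge c ws w (b + 1)
      omega
    · rename_i hov
      rcases ih (cur + w) b h with hnil | hle
      · subst hnil
        simp only [List.sum_cons, List.sum_nil]
        omega
      · simp only [List.sum_cons]
        omega

-- when every accepted cap is at least sum(weights), the search never moves answer off sum
theorem bsearchA_stay (ws : List Int) (k : Int)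
    (hfe : ∀ c, boxesOf ws c ≤ max k 1 → ws.sum ≤ c) :
    ∀ n (left right : Int), (right + 1 - left).toNat = n → right ≤ ws.sum →
      bsearchA ws k left right ws.sum = ws.sum := by
  intro n
  induction n using Nat.strong_induction_on with
  | _ n ihn =>
    intro left right hn hr
    rw [bsearchA]
    split
    · rename_i hlr
      obtain ⟨hm1, hm2⟩ := PySem.Int.floordiv_two_mid_bounds hlr
      simp only [can_divide_eq, decide_eq_true_eq]
      by_cases hfeas : boxesOf ws (PySem.Int.floordiv (left + right) 2) ≤ max k 1
      · rw [if_pos hfeas]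
        have hms : ws.sum ≤ PySem.Int.floordiv (left + right) 2 := hfe _ hfeas
        have hmid_eq : PySem.Int.floordiv (left + right) 2 = ws.sum := by omega
        rw [hmid_eq]
        exact ihn _ (by omega) left (ws.sum - 1) rfl (by omega)
      · rw [if_neg hfeas]
        exact ihn _ (by omega) (PySem.Int.floordiv (left + right) 2 + 1) right rfl hr
    · rfl

-- ---- assembly ----

theorem A_eq_B (ws : List Int) (k : Int) (hne : ws ≠ [])
    (hpre : (∀ w ∈ ws, 0 ≤ w) ∨ k ≤ 1) :
    find_min_max_weight ws k = find_min_max_weight_alt ws k := by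
  rcases hpre with hnn | hk1
  · cases hmx : PySem.List.max? ws (fun x => x) with
    | none => exact absurd ((PySem.List.max?_eq_none_iff _ _).mp hmx) hne
    | some mx =>
    have hmem : mx ∈ ws := PySem.List.max?_mem hmx
    have hmax_all : ∀ y ∈ ws, y ≤ mx := PySem.List.max?_isMax hmx
    have hm0 : 0 ≤ mx := hnn mx hmem
    have hms : mx ≤ ws.sum := List.single_le_sum hnn mx hmem
    have hFsum : boxesOf ws ws.sum ≤ max k 1 := by
      rw [boxes_sum ws hnn]; omega
    have hlen1 : 0 < ws.length := List.length_pos_iff.mpr hne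
    obtain ⟨hfa, hla, hmina⟩ := bsearchA_spec ws k mx ws.sum hnn hms hFsum
      _ mx ws.sum ws.sum rfl le_rfl le_rfl (by omega)
      (fun m h1 h2 => absurd h1 (by omega))
      (fun h => absurd h (lt_irrefl _))
      (fun _ => rfl)
    rw [alt_eq_R ws k hne]
    set t := (min k (ws.length : Int) - 1).toNat with ht
    have hfb : boxesOf ws (R ws t ws.length) ≤ max k 1 := by
      have h1 := feas_of_R ws t (R ws t ws.length) hnn le_rfl
      omega
    have hlb : mx ≤ R ws t ws.length := by
      refine R_ge_mem ws t ws.length hnn mx ?_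
      rw [List.take_length]
      exact hmem
    have hminb : ∀ d, mx ≤ d → d < R ws t ws.length → ¬ (boxesOf ws d ≤ max k 1) := by
      intro d hdL hdlt hFd
      have hdc : ∀ w ∈ ws, w ≤ d := fun w hw => le_trans (hmax_all w hw) hdL
      have hd0 : 0 ≤ d := le_trans hm0 hdL
      have hbl := boxes_le_len ws d hne hdc
      have hb : boxesOf ws d ≤ (t : Int) + 1 := by omega
      have := R_le_of_boxes ws d t hnn hdc hd0 hb
      omega
    unfold find_min_max_weight
    rw [hmx]
    simp only [Option.getD_some]
    apply le_antisymm
    · by_contra h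
      push Not at h
      exact (hmina _ hlb h) hfb
    · by_contra h
      push Not at h
      exact (hminb _ hla h) hfa
  · -- k ≤ 1: A's probe accepts only caps ≥ sum, so the search returns sum; B runs no DP round
    have hlen1 : 0 < ws.length := List.length_pos_iff.mpr hne
    have hsum_le : ∀ c, boxesOf ws c ≤ max k 1 → ws.sum ≤ c := by
      intro c hc
      have h1 := gbAux_fst_ge c ws 0 1
      have h2 : (gbAux c ws 0 1).1 = 1 := by unfold boxesOf at hc; omega
      rcases gbAux_one_imp_sum c ws 0 1 h2 with h | h
      · exact absurd h hne
      · omega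
    unfold find_min_max_weight
    cases hmx : PySem.List.max? ws (fun x => x) with
    | none => exact absurd ((PySem.List.max?_eq_none_iff _ _).mp hmx) hne
    | some mx =>
    simp only [Option.getD_some]
    rw [bsearchA_stay ws k hsum_le _ mx ws.sum rfl le_rfl]
    rw [alt_eq_R ws k hne]
    have ht0 : (min k (ws.length : Int) - 1).toNat = 0 := by omega
    rw [ht0]
    rw [show R ws 0 ws.length = S ws ws.length from rfl]
    unfold S
    rw [List.take_length]

-- ===== VERDICT (by name: the statement is the Claim_ definition above) =====
theorem find_min_max_weight_spec : Claim_equal_find_min_max_weight := by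
  intro weights k _hdom hpre
  unfold Spec_find_min_max_weight
  exact A_eq_B weights k hpre.1 hpre.2
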